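-- pv_equiv track=rewrite | github.com/JNeuda/Twitter-Stream-Sentiment-Analysis | tweet.py | filter_brands
-- ===== SOURCE A (Python) =====
-- def filter_brands(text):
--     brands = ["@BBC", "@CBS", "@CNN", "@FoxNews", "@nytimes"]
--
--     for brand in brands:
--         if (brand in text):
--             text = text.replace(brand, "<mark>{}</mark>".format(brand))
--         else:
--             continue
--
--     return text
-- ===== SOURCE B (Python) =====
-- def filter_brands(text):
--     brands = ("@BBC", "@CBS", "@CNN", "@FoxNews", "@nytimes")
--     out = []
--     i = 0
--     n = len(text)
--     while i < n:
--         for brand in brands: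
--             if text.startswith(brand, i):
--                 out.append("<mark>" + brand + "</mark>")
--                 i += len(brand)
--                 break
--         else:
--             out.append(text[i])
--             i += 1
--     return "".join(out)
-- ===== Notes on version B (the rewrite author's own statement) =====
-- stated objective: alternative
-- what changed: A makes five sequential full-text scan-and-replace passes (one str.replace per brand); B scans the text once left to right, trying the five brands at each position and wrapping the one that matches.
import Mathlib
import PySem

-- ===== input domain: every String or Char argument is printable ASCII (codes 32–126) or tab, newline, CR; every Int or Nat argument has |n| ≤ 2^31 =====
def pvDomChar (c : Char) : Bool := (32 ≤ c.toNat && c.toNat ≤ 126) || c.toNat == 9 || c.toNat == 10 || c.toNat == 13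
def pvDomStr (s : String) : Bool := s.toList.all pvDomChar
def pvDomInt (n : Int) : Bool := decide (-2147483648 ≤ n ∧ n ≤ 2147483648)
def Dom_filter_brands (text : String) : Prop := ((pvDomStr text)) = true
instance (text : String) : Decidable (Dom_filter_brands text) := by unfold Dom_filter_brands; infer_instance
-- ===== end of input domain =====

-- B replaces A's five sequential full-text scan-and-replace passes by ONE left-to-right scan
-- that wraps whichever brand matches at each position (objective: alternative single-pass algorithm).

-- ===== PORT A =====
-- A: for brand in brands: if brand in text: text = text.replace(brand, "<mark>{}</mark>".format(brand))
def filter_brands (text : String) : String :=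
  let brands : List String := ["@BBC", "@CBS", "@CNN", "@FoxNews", "@nytimes"]
  brands.foldl (fun t brand =>
    if PySem.Str.isIn brand t then
      PySem.Str.replace t brand ("<mark>" ++ brand ++ "</mark>")
    else t) text

-- ===== PORT B =====
def pvBrands : List (List Char) :=
  ["@BBC".toList, "@CBS".toList, "@CNN".toList, "@FoxNews".toList, "@nytimes".toList]

def pvWrap (b : List Char) : List Char := "<mark>".toList ++ b ++ "</mark>".toList

-- B's while-loop: at each position try the brands in order (Python's for…else);
-- on a match emit the wrapped brand and skip it, otherwise emit the character.
def pvScan (bs : List (List Char)) : List Char → List Char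
  | [] => []
  | c :: t =>
    match bs.find? (fun b => b.isPrefixOf (c :: t)) with
    | some b => pvWrap b ++ pvScan bs (t.drop (b.length - 1))
    | none => c :: pvScan bs t
termination_by l => l.length
decreasing_by
  · simp only [List.length_drop, List.length_cons]; omega
  · simp

def filter_brands_alt (text : String) : String :=
  String.ofList (pvScan pvBrands text.toList)

-- ===== PRECONDITION & SPEC =====
def Spec_filter_brands (text : String) (out : String) : Prop := out = filter_brands_alt text
instance (text : String) (out : String) : Decidable (Spec_filter_brands text out) := by unfold Spec_filter_brands; infer_instance

-- ===== CLAIM (what is proved, stated in full; the proofs are below) =====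
def Claim_equal_filter_brands : Prop := ∀ (text : String), Dom_filter_brands text → Spec_filter_brands text (filter_brands text)

-- ===== LEMMAS AND PROOFS =====

-- pvRep is Python's s.replace(old, new) for a nonempty pattern, written as the obvious
-- left-to-right structural recursion (proved equal to PySem.Chars.replace below).
def pvRep (p r : List Char) : List Char → List Char
  | [] => []
  | c :: t =>
    if p.isPrefixOf (c :: t) then r ++ pvRep p r (t.drop (p.length - 1))
    else c :: pvRep p r t
termination_by l => l.length
decreasing_by
  · simp only [List.length_drop, List.length_cons]; omega
  · simp

theorem pvRep_nil (p r : List Char) : pvRep p r [] = [] := by simp [pvRep]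

theorem pvRep_cons_pos (p r : List Char) (c : Char) (t : List Char)
    (h : p.isPrefixOf (c :: t) = true) :
    pvRep p r (c :: t) = r ++ pvRep p r (t.drop (p.length - 1)) := by
  rw [pvRep]; simp [h]

theorem pvRep_cons_neg (p r : List Char) (c : Char) (t : List Char)
    (h : ¬ p.isPrefixOf (c :: t) = true) :
    pvRep p r (c :: t) = c :: pvRep p r t := by
  rw [pvRep]; simp [h]

theorem pvScan_nilText (bs : List (List Char)) : pvScan bs [] = [] := by simp [pvScan]

theorem pvScan_cons_some (bs : List (List Char)) (c : Char) (t b : List Char)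
    (h : bs.find? (fun b => b.isPrefixOf (c :: t)) = some b) :
    pvScan bs (c :: t) = pvWrap b ++ pvScan bs (t.drop (b.length - 1)) := by
  rw [pvScan, h]

theorem pvScan_cons_none (bs : List (List Char)) (c : Char) (t : List Char)
    (h : bs.find? (fun b => b.isPrefixOf (c :: t)) = none) :
    pvScan bs (c :: t) = c :: pvScan bs t := by
  rw [pvScan, h]

-- replace.go with enough fuel is pvRep
theorem rep_go_spec (fuel : Nat) (p r : List Char) (hp : p ≠ []) :
    ∀ l acc : List Char, l.length ≤ fuel →
      PySem.Chars.replace.go p r fuel l acc = acc.reverse ++ pvRep p r l := by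
  induction fuel with
  | zero =>
    intro l acc h
    have : l = [] := List.length_eq_zero_iff.mp (Nat.le_zero.mp h)
    subst this
    rw [PySem.Chars.replace.go, pvRep_nil]
  | succ n ih =>
    intro l acc h
    cases l with
    | nil => rw [PySem.Chars.replace.go, pvRep_nil]; simp; omega
    | cons c t =>
      rw [PySem.Chars.replace.go]
      by_cases hpre : p.isPrefixOf (c :: t) = true
      · simp only [hpre, if_true]
        obtain ⟨k, hk⟩ : ∃ k, p.length = k + 1 := by
          cases p with
          | nil => exact absurd rfl hp
          | cons a b => exact ⟨b.length, rfl⟩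
        have hdrop : List.drop p.length (c :: t) = t.drop (p.length - 1) := by
          rw [hk]; simp
        have hlen2 : (t.drop (p.length - 1)).length ≤ n := by
          simp only [List.length_drop]
          simp only [List.length_cons] at h
          omega
        rw [hdrop, ih (t.drop (p.length - 1)) (r.reverse ++ acc) hlen2,
            pvRep_cons_pos p r c t hpre]
        simp
      · simp only [hpre, Bool.false_eq_true, if_false]
        have hlen2 : t.length ≤ n := by simp only [List.length_cons] at h; omega
        rw [ih t (c :: acc) hlen2, pvRep_cons_neg p r c t hpre]
        simp

theorem replace_eq_pvRep (s p r : List Char) (hp : p ≠ []) :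
    PySem.Chars.replace s p r = pvRep p r s := by
  rw [PySem.Chars.replace]
  simp only [List.isEmpty_iff, hp, if_false]
  simpa using rep_go_spec s.length p r hp s [] le_rfl

-- if the pattern occurs nowhere, replace is the identity
theorem pvRep_id_of_not_infix (p r : List Char) :
    ∀ l, ¬ p <:+: l → pvRep p r l = l := by
  intro l
  induction l with
  | nil => intro _; exact pvRep_nil p r
  | cons c t ih =>
    intro h
    have hpre : ¬ p.isPrefixOf (c :: t) = true := by
      intro hx
      exact h ((PySem.Chars.startswith_iff (c :: t) p).mp hx).isInfix
    rw [pvRep_cons_neg p r c t hpre, ih (fun h2 => h (List.infix_cons h2))]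

-- the A-step with its `in`-test equals an unconditional replace
theorem strStep (b : String) (hb : b.toList ≠ []) (t : String) :
    (if PySem.Str.isIn b t then PySem.Str.replace t b ("<mark>" ++ b ++ "</mark>") else t)
      = String.ofList (pvRep b.toList (pvWrap b.toList) t.toList) := by
  have hw : ("<mark>" ++ b ++ "</mark>").toList = pvWrap b.toList := by
    simp [String.toList_append, pvWrap]
  by_cases h : PySem.Str.isIn b t
  · rw [if_pos h, PySem.Str.replace, hw, replace_eq_pvRep _ _ _ hb]
  · rw [if_neg h]
    have hni : ¬ b.toList <:+: t.toList := by
      have := PySem.Chars.isIn_eq_false_iff b.toList t.toList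
      exact this.mp (by simpa [PySem.Str.isIn] using eq_false_of_ne_true h)
    rw [pvRep_id_of_not_infix _ _ _ hni, String.ofList_toList]

-- a pattern that cannot match starting inside `pre` passes over `pre ++ X`
theorem pvRep_pass (p r pre : List Char)
    (h : ∀ suf ∈ pre.tails, suf ≠ [] → ¬ suf <+: p ∧ ¬ p <+: suf) :
    ∀ X, pvRep p r (pre ++ X) = pre ++ pvRep p r X := by
  induction pre with
  | nil => intro X; simp
  | cons c pre' ih =>
    intro X
    have hnp : ¬ p.isPrefixOf ((c :: pre') ++ X) = true := by
      intro hx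
      have hpp : p <+: ((c :: pre') ++ X) := (PySem.Chars.startswith_iff _ p).mp hx
      have hself : (c :: pre') <+: ((c :: pre') ++ X) := List.prefix_append _ _
      have hcase := List.prefix_or_prefix_of_prefix hpp hself
      have hme := h (c :: pre') (by simp [List.mem_tails]) (by simp)
      rcases hcase with h1 | h1
      · exact hme.2 h1
      · exact hme.1 h1
    rw [List.cons_append, pvRep_cons_neg p r c (pre' ++ X) hnp, ih (fun suf hs hne =>
      h suf (by
        rw [List.mem_tails] at hs ⊢
        exact hs.trans (List.suffix_cons c pre')) hne) X]
    simp

-- no brand in bs can match starting inside `pre` : the scan copies `pre` verbatim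
theorem pvScan_pass (bs : List (List Char)) (pre : List Char)
    (h : ∀ suf ∈ pre.tails, suf ≠ [] → ∀ b ∈ bs, ¬ suf <+: b ∧ ¬ b <+: suf) :
    ∀ X, pvScan bs (pre ++ X) = pre ++ pvScan bs X := by
  induction pre with
  | nil => intro X; simp
  | cons c pre' ih =>
    intro X
    have hnone : bs.find? (fun b => b.isPrefixOf (c :: (pre' ++ X))) = none := by
      rw [List.find?_eq_none]
      intro b hb hx
      have hpp : b <+: ((c :: pre') ++ X) := by
        simpa using (PySem.Chars.startswith_iff _ b).mp hx
      have hself : (c :: pre') <+: ((c :: pre') ++ X) := List.prefix_append _ _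
      have hme := h (c :: pre') (by simp [List.mem_tails]) (by simp) b hb
      rcases List.prefix_or_prefix_of_prefix hpp hself with h1 | h1
      · exact hme.2 h1
      · exact hme.1 h1
    rw [List.cons_append, pvScan_cons_none bs c (pre' ++ X) hnone, ih (fun suf hs hne =>
      h suf (by
        rw [List.mem_tails] at hs ⊢
        exact hs.trans (List.suffix_cons c pre')) hne) X]
    simp

-- scanning never creates a new occurrence of a '<'-free pattern at the front
theorem pvScan_noMatch (bs : List (List Char)) :
    ∀ (l p : List Char), (∀ ch ∈ p, ch ≠ '<') → ¬ p <+: l →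
      ¬ p.isPrefixOf (pvScan bs l) = true := by
  intro l
  induction l with
  | nil =>
    intro p _ hnp hx
    rw [pvScan_nilText] at hx
    exact hnp (by simpa using (PySem.Chars.startswith_iff [] p).mp hx)
  | cons c t ih =>
    intro p hchars hnp hx
    cases p with
    | nil => exact hnp (List.nil_prefix)
    | cons a p' =>
      have ha : a ≠ '<' := hchars a (by simp)
      cases hfind : bs.find? (fun b => b.isPrefixOf (c :: t)) with
      | some b =>
        rw [pvScan_cons_some bs c t b hfind] at hx
        have : pvWrap b ++ pvScan bs (t.drop (b.length - 1))
            = '<' :: ("mark>".toList ++ b ++ "</mark>".toList ++ pvScan bs (t.drop (b.length - 1))) := by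
          simp [pvWrap]
        rw [this] at hx
        simp only [List.isPrefixOf, Bool.and_eq_true, beq_iff_eq] at hx
        exact ha hx.1
      | none =>
        rw [pvScan_cons_none bs c t hfind] at hx
        simp only [List.isPrefixOf, Bool.and_eq_true, beq_iff_eq] at hx
        obtain ⟨hac, hx'⟩ := hx
        subst hac
        have hnp' : ¬ p' <+: t := by
          intro h2
          exact hnp (List.cons_prefix_cons.mpr ⟨rfl, h2⟩)
        exact ih p' (fun ch hc => hchars ch (by simp [hc])) hnp' hx'

-- replacing p ++ Z wraps the head occurrence
theorem pvRep_self_prefix (p r : List Char) (hp : p ≠ []) (Z : List Char) :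
    pvRep p r (p ++ Z) = r ++ pvRep p r Z := by
  cases p with
  | nil => exact absurd rfl hp
  | cons d p' =>
    have hpre : (d :: p').isPrefixOf ((d :: p') ++ Z) = true :=
      (PySem.Chars.startswith_iff _ _).mpr (List.prefix_append _ _)
    rw [List.cons_append] at hpre ⊢
    rw [pvRep_cons_pos (d :: p') r d (p' ++ Z) hpre]
    simp

-- MAIN STEP: one more sequential replace = the scan with one more brand appended
theorem step_generic (prev : List (List Char)) (bk : List Char)
    (hb : bk ≠ [])
    (hlt : ∀ ch ∈ bk, ch ≠ '<')
    (hw : ∀ b ∈ prev, ∀ suf ∈ (pvWrap b).tails, suf ≠ [] → ¬ suf <+: bk ∧ ¬ bk <+: suf)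
    (hs : ∀ suf ∈ bk.tails, suf ≠ [] → ∀ b ∈ prev, ¬ suf <+: b ∧ ¬ b <+: suf) :
    ∀ l, pvRep bk (pvWrap bk) (pvScan prev l) = pvScan (prev ++ [bk]) l := by
  suffices H : ∀ (n : Nat) (l : List Char), l.length ≤ n →
      pvRep bk (pvWrap bk) (pvScan prev l) = pvScan (prev ++ [bk]) l by
    intro l; exact H l.length l le_rfl
  intro n
  induction n with
  | zero =>
    intro l h
    have : l = [] := List.length_eq_zero_iff.mp (Nat.le_zero.mp h)
    subst this
    rw [pvScan_nilText, pvScan_nilText, pvRep_nil]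
  | succ m ih =>
    intro l hlen
    cases l with
    | nil => rw [pvScan_nilText, pvScan_nilText, pvRep_nil]
    | cons c t =>
      cases hfind : prev.find? (fun b => b.isPrefixOf (c :: t)) with
      | some b =>
        have hbmem : b ∈ prev := List.mem_of_find?_eq_some hfind
        rw [pvScan_cons_some prev c t b hfind,
            pvRep_pass bk (pvWrap bk) (pvWrap b) (hw b hbmem),
            ih (t.drop (b.length - 1)) (by simp at hlen ⊢; omega),
            pvScan_cons_some (prev ++ [bk]) c t b
              (by rw [List.find?_append, hfind]; rfl)]
      | none =>
        by_cases hk : bk.isPrefixOf (c :: t) = true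
        · -- the new brand matches at the head
          obtain ⟨rest, hrest⟩ := (PySem.Chars.startswith_iff (c :: t) bk).mp hk
          have hscan : pvScan prev (c :: t) = bk ++ pvScan prev rest := by
            rw [← hrest]; exact pvScan_pass prev bk hs rest
          obtain ⟨k, hkl⟩ : ∃ k, bk.length = k + 1 := by
            cases bk with
            | nil => exact absurd rfl hb
            | cons a b => exact ⟨b.length, rfl⟩
          have hdrop : t.drop (bk.length - 1) = rest := by
            have h1 : List.drop bk.length (c :: t) = rest := by rw [← hrest]; simp
            rw [hkl] at h1 ⊢
            simpa using h1
          have hrlen : rest.length ≤ m := by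
            have := congrArg List.length hrest
            simp [hkl] at this hlen ⊢
            omega
          rw [hscan, pvRep_self_prefix bk (pvWrap bk) hb, ih rest hrlen,
              pvScan_cons_some (prev ++ [bk]) c t bk
                (by rw [List.find?_append, hfind]; simp [hk]), hdrop]
        · -- no brand matches at the head
          have hnpl : ¬ bk <+: (c :: t) := fun h2 =>
            hk ((PySem.Chars.startswith_iff (c :: t) bk).mpr h2)
          have hnomatch : ¬ bk.isPrefixOf (pvScan prev (c :: t)) = true :=
            pvScan_noMatch prev (c :: t) bk hlt hnpl
          rw [pvScan_cons_none prev c t hfind] at hnomatch ⊢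
          rw [pvRep_cons_neg _ _ _ _ hnomatch, ih t (by simp at hlen; omega),
              pvScan_cons_none (prev ++ [bk]) c t
                (by rw [List.find?_append, hfind]; simp [hk])]

theorem pvScan_nil_brands : ∀ l, pvScan [] l = l := by
  intro l
  induction l with
  | nil => exact pvScan_nilText []
  | cons c t ih => rw [pvScan_cons_none [] c t (by simp)]; rw [ih]

-- pairwise non-overlap facts used by the five chain steps
set_option maxRecDepth 8000 in
theorem pvHw1 : ∀ b ∈ ([] : List (List Char)), ∀ suf ∈ (pvWrap b).tails, suf ≠ [] → ¬ suf <+: "@BBC".toList ∧ ¬ "@BBC".toList <+: suf := by decide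

set_option maxRecDepth 8000 in
theorem pvHs1 : ∀ suf ∈ ("@BBC".toList : List Char).tails, suf ≠ [] → ∀ b ∈ ([] : List (List Char)), ¬ suf <+: b ∧ ¬ b <+: suf := by decide

set_option maxRecDepth 8000 in
theorem pvHw2 : ∀ b ∈ (["@BBC".toList] : List (List Char)), ∀ suf ∈ (pvWrap b).tails, suf ≠ [] → ¬ suf <+: "@CBS".toList ∧ ¬ "@CBS".toList <+: suf := by decide

set_option maxRecDepth 8000 in
theorem pvHs2 : ∀ suf ∈ ("@CBS".toList : List Char).tails, suf ≠ [] → ∀ b ∈ (["@BBC".toList] : List (List Char)), ¬ suf <+: b ∧ ¬ b <+: suf := by decide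

set_option maxRecDepth 8000 in
theorem pvHw3 : ∀ b ∈ (["@BBC".toList, "@CBS".toList] : List (List Char)), ∀ suf ∈ (pvWrap b).tails, suf ≠ [] → ¬ suf <+: "@CNN".toList ∧ ¬ "@CNN".toList <+: suf := by decide

set_option maxRecDepth 8000 in
theorem pvHs3 : ∀ suf ∈ ("@CNN".toList : List Char).tails, suf ≠ [] → ∀ b ∈ (["@BBC".toList, "@CBS".toList] : List (List Char)), ¬ suf <+: b ∧ ¬ b <+: suf := by decide

set_option maxRecDepth 8000 in
theorem pvHw4 : ∀ b ∈ (["@BBC".toList, "@CBS".toList, "@CNN".toList] : List (List Char)), ∀ suf ∈ (pvWrap b).tails, suf ≠ [] → ¬ suf <+: "@FoxNews".toList ∧ ¬ "@FoxNews".toList <+: suf := by decide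

set_option maxRecDepth 8000 in
theorem pvHs4 : ∀ suf ∈ ("@FoxNews".toList : List Char).tails, suf ≠ [] → ∀ b ∈ (["@BBC".toList, "@CBS".toList, "@CNN".toList] : List (List Char)), ¬ suf <+: b ∧ ¬ b <+: suf := by decide

set_option maxRecDepth 8000 in
theorem pvHw5 : ∀ b ∈ (["@BBC".toList, "@CBS".toList, "@CNN".toList, "@FoxNews".toList] : List (List Char)), ∀ suf ∈ (pvWrap b).tails, suf ≠ [] → ¬ suf <+: "@nytimes".toList ∧ ¬ "@nytimes".toList <+: suf := by decide

set_option maxRecDepth 8000 in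
theorem pvHs5 : ∀ suf ∈ ("@nytimes".toList : List Char).tails, suf ≠ [] → ∀ b ∈ (["@BBC".toList, "@CBS".toList, "@CNN".toList, "@FoxNews".toList] : List (List Char)), ¬ suf <+: b ∧ ¬ b <+: suf := by decide

-- the full five-step chain
set_option maxRecDepth 8000 in
theorem chain_eq (l : List Char) :
    pvRep "@nytimes".toList (pvWrap "@nytimes".toList)
      (pvRep "@FoxNews".toList (pvWrap "@FoxNews".toList)
        (pvRep "@CNN".toList (pvWrap "@CNN".toList)
          (pvRep "@CBS".toList (pvWrap "@CBS".toList)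
            (pvRep "@BBC".toList (pvWrap "@BBC".toList) l)))) = pvScan pvBrands l := by
  have h0 : pvRep "@BBC".toList (pvWrap "@BBC".toList) l = pvScan ["@BBC".toList] l := by
    rw [← pvScan_nil_brands l]
    conv_rhs => rw [pvScan_nil_brands l]
    exact step_generic [] "@BBC".toList (by decide) (by simp) pvHw1 pvHs1 l
  rw [h0, step_generic ["@BBC".toList] "@CBS".toList (by decide) (by simp) pvHw2 pvHs2 l]
  simp only [List.cons_append, List.nil_append]
  rw [step_generic ["@BBC".toList, "@CBS".toList] "@CNN".toList (by decide) (by simp) pvHw3 pvHs3 l]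
  simp only [List.cons_append, List.nil_append]
  rw [step_generic ["@BBC".toList, "@CBS".toList, "@CNN".toList] "@FoxNews".toList (by decide) (by simp) pvHw4 pvHs4 l]
  simp only [List.cons_append, List.nil_append]
  rw [step_generic ["@BBC".toList, "@CBS".toList, "@CNN".toList, "@FoxNews".toList] "@nytimes".toList (by decide) (by simp) pvHw5 pvHs5 l]
  simp only [List.cons_append, List.nil_append]
  rfl

-- ===== VERDICT (by name: the statement is the Claim_ definition above) =====
theorem filter_brands_spec : Claim_equal_filter_brands := by
  intro text _
  unfold Spec_filter_brands filter_brands filter_brands_alt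
  simp only [List.foldl]
  rw [strStep "@BBC" (by decide) text,
      strStep "@CBS" (by decide) _,
      strStep "@CNN" (by decide) _,
      strStep "@FoxNews" (by decide) _,
      strStep "@nytimes" (by decide) _]
  simp only [String.toList_ofList]
  rw [chain_eq]
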